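-- pv_equiv track=rewrite | github.com/danbom/algorithm_study | EPPER 10회/2_OX퀴즈.py | solution
-- ===== SOURCE A (Python) =====
-- def solution(user_input):
-- 	# 먼저 정답이 될 total_score 변수 만들기
-- 	total_score = 0
--
-- 	# 연속된 O의 개수 담을 변수 만들기
-- 	continuity = 0
--
-- 	# user_input에서 O 감지하기
-- 	# user_input을 돌면서
-- 	## user_input의 내용을 인덱싱해서 받기 위해 ㅣㅑㄴㅅ
-- 	for i in list(user_input):
-- 		# O를 만났을 때 continuity +=1
-- 		# 큰따옴표 안에 넣기
-- 		# 아아 list[i]가 아니라 i가 list 자체이기 때문에 그냥 i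
-- 		if i == "O":
-- 			continuity += 1
--
-- 		else:
-- 			# 아 헐 이게 위치가 여기면 마지막이 O로 끝날 경우 continuity가 더해지지 않는다
-- 			# total_score += continuity
-- 			continuity = 0
--
-- 		# 한 문제마다 total_score에 더해지도록 여기에 위치시킨다!
-- 		total_score += continuity
--
-- 	return total_score
-- ===== SOURCE B (Python) =====
-- from itertools import groupby
--
-- def solution(user_input):
--     total_score = 0
--     for key, grp in groupby(user_input):
--         if key == "O":
--             L = sum(1 for _ in grp)
--             total_score += L * (L + 1) // 2
--     return total_score
-- ===== Notes on version B (the rewrite author's own statement) =====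
-- stated objective: simpler
-- what changed: Replaced the per-character running-counter accumulation with a run-length decomposition (itertools.groupby) that adds the triangular number L*(L+1)//2 for each maximal 'O' run.
import Mathlib
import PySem

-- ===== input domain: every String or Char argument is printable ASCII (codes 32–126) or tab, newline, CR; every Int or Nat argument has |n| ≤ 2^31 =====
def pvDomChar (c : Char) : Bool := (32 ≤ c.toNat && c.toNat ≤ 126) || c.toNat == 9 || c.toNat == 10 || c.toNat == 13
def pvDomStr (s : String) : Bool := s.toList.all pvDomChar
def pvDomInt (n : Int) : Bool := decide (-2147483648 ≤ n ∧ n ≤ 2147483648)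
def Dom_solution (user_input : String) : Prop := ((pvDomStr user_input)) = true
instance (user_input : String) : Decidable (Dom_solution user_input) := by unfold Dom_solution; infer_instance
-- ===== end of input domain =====

-- B replaces A's running-counter single pass by a run-length decomposition:
-- each maximal run of 'O' of length L contributes the triangular number L*(L+1)//2.


-- ===== PORT A =====
-- literal port: for each char, update continuity, then total_score += continuity
def stepA (st : Int × Int) (i : Char) : Int × Int :=
  let st' := if i == 'O' then (st.1, st.2 + 1) else (st.1, (0 : Int))
  (st'.1 + st'.2, st'.2)

def solution (user_input : String) : Int :=
  (user_input.toList.foldl stepA ((0 : Int), (0 : Int))).1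

-- ===== PORT B =====
-- run-length decomposition: take each maximal 'O' run, add L*(L+1)//2
def solutionAltAux : List Char → Int
  | [] => 0
  | c :: rest =>
    if c = 'O' then
      let L : Int := ((rest.takeWhile (fun x => x == 'O')).length : Int) + 1
      PySem.Int.floordiv (L * (L + 1)) 2 + solutionAltAux (rest.dropWhile (fun x => x == 'O'))
    else
      solutionAltAux rest
termination_by l => l.length
decreasing_by
  · exact Nat.lt_succ_of_le (List.length_dropWhile_le _ _)
  · simp

def solution_alt (user_input : String) : Int := solutionAltAux user_input.toList

-- ===== PRECONDITION & SPEC =====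
def Spec_solution (user_input : String) (out : Int) : Prop := out = solution_alt user_input
instance (user_input : String) (out : Int) : Decidable (Spec_solution user_input out) := by unfold Spec_solution; infer_instance

-- ===== CLAIM (what is proved, stated in full; the proofs are below) =====
def Claim_equal_solution : Prop := ∀ (user_input : String), Dom_solution user_input → Spec_solution user_input (solution user_input)

-- ===== LEMMAS AND PROOFS =====

-- score contributed by the rest of the string when the current run length is c
def gScore : List Char → Int → Int
  | [], _ => 0
  | x :: xs, c => if x = 'O' then (c + 1) + gScore xs (c + 1) else gScore xs 0

-- final continuity value
def hCont : List Char → Int → Int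
  | [], c => c
  | x :: xs, c => hCont xs (if x = 'O' then c + 1 else 0)

theorem foldl_eq_g (l : List Char) (t c : Int) :
    l.foldl stepA (t, c) = (t + gScore l c, hCont l c) := by
  induction l generalizing t c with
  | nil => simp [gScore, hCont]
  | cons x xs ih =>
    rw [List.foldl_cons]
    by_cases hx : x = 'O' <;>
      · simp only [stepA, hx, beq_iff_eq, reduceIte, gScore, hCont, if_pos]
        rw [ih]
        refine Prod.ext ?_ rfl
        simp only
        ring

-- sum (c+1) + (c+2) + ... + (c+n)
def trisum (c : Int) : Nat → Int
  | 0 => 0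
  | n + 1 => (c + 1) + trisum (c + 1) n

theorem two_trisum (n : Nat) (c : Int) : 2 * trisum c n = n * (2 * c + n + 1) := by
  induction n generalizing c with
  | zero => simp [trisum]
  | succ n ih =>
    simp only [trisum]
    rw [mul_add, ih (c + 1)]
    push_cast
    ring

theorem g_run (pre : List Char) (post : List Char) (c : Int)
    (hpre : ∀ x ∈ pre, x = 'O') :
    gScore (pre ++ post) c = trisum c pre.length + gScore post (c + pre.length) := by
  induction pre generalizing c with
  | nil => simp [trisum]
  | cons x xs ih =>
    have hx : x = 'O' := hpre x (by simp)
    simp only [List.cons_append, gScore, hx, List.length_cons, trisum]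
    rw [ih (c + 1) (fun y hy => hpre y (by simp [hy]))]
    push_cast
    ring_nf

-- gScore is insensitive to the incoming counter when the list does not start with 'O'
theorem g_indep (post : List Char) (c : Int) (h : ∀ x ∈ post.head?, x ≠ 'O') :
    gScore post c = gScore post 0 := by
  cases post with
  | nil => rfl
  | cons x xs =>
    have hx : x ≠ 'O' := h x (by simp)
    simp [gScore, hx]

theorem floordiv_two_mul (k : Int) : PySem.Int.floordiv (2 * k) 2 = k := by
  rw [PySem.Int.floordiv_eq_ediv_of_pos (by norm_num)]
  omega

theorem g_eq_aux (l : List Char) : gScore l 0 = solutionAltAux l := by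
  induction l using solutionAltAux.induct with
  | case1 => simp [gScore, solutionAltAux]
  | case2 rest ih =>
    have hsplit : 'O' :: rest
        = ('O' :: rest.takeWhile (fun x => x == 'O')) ++ rest.dropWhile (fun x => x == 'O') := by
      rw [List.cons_append, List.takeWhile_append_dropWhile]
    conv_lhs => rw [hsplit]
    rw [g_run _ _ 0 (by
      intro x hx
      cases hx with
      | head => rfl
      | tail _ hx => simpa using List.mem_takeWhile_imp hx)]
    have hdrop : gScore (rest.dropWhile (fun x => x == 'O'))
        (0 + (('O' :: rest.takeWhile (fun x => x == 'O')).length : Int))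
        = gScore (rest.dropWhile (fun x => x == 'O')) 0 := by
      apply g_indep
      intro x hx
      cases hd : (rest.dropWhile (fun x => x == 'O')) with
      | nil => simp [hd] at hx
      | cons y ys =>
        simp [hd] at hx
        subst hx
        have := List.head?_dropWhile_not (p := fun x => x == 'O') (l := rest)
        simp [hd] at this
        simpa using this
    rw [hdrop, ih]
    conv_rhs => rw [solutionAltAux.eq_def]
    simp only [reduceIte]
    have htri : trisum 0 ('O' :: rest.takeWhile (fun x => x == 'O')).length
        = PySem.Int.floordiv
            ((((rest.takeWhile (fun x => x == 'O')).length : Int) + 1)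
              * ((((rest.takeWhile (fun x => x == 'O')).length : Int) + 1) + 1)) 2 := by
      have h2 : (((rest.takeWhile (fun x => x == 'O')).length : Int) + 1)
            * ((((rest.takeWhile (fun x => x == 'O')).length : Int) + 1) + 1)
          = 2 * trisum 0 ('O' :: rest.takeWhile (fun x => x == 'O')).length := by
        rw [two_trisum]
        simp only [List.length_cons]
        push_cast
        ring
      rw [h2, floordiv_two_mul]
    rw [htri]
  | case3 c rest hc ih =>
    rw [solutionAltAux.eq_def]
    simp [gScore, hc, ih]

-- ===== VERDICT (by name: the statement is the Claim_ definition above) =====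
theorem solution_spec : Claim_equal_solution := by
  intro s _
  show solution s = solution_alt s
  unfold solution solution_alt
  rw [foldl_eq_g]
  simpa using g_eq_aux s.toList
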